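-- pv_equiv track=rewrite | github.com/jmcrawford45/project-euler | 214.py | totient_chains
-- ===== SOURCE A (Python) =====
-- def totient_chains(d: int, length: int) -> int:
--     phi = list(range(d+1))
--     primes = []
--     for i, v in enumerate(phi):
--         if i < 2:
--             continue
--         if i == v:
--             primes.append(i)
--             for j in range(i, len(phi), i):
--                 phi[j] //= i
--                 phi[j] *= i-1
--     res = 0
--     cache = dict()
--     for i in primes:
--         curr = i
--         chain_len = 1
--         while curr != 1 and chain_len <= length:
--             if curr in cache:
--                 chain_len += cache[curr] - 1
--                 break
--             chain_len += 1
--             curr = phi[curr]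
--         cache[i] = chain_len
--         if chain_len == length:
--             res += i
--     return res
-- ===== SOURCE B (Python) =====
-- def totient_chains(d: int, length: int) -> int:
--     n = d + 1
--     phi = list(range(n))
--     primes = []
--     for i in range(2, n):
--         if phi[i] == i:
--             primes.append(i)
--             for j in range(i, n, i):
--                 phi[j] -= phi[j] // i
--     chain = [0] * n
--     if n > 1:
--         chain[1] = 1
--     for m in range(2, n):
--         chain[m] = chain[phi[m]] + 1
--     return sum(p for p in primes if chain[p] == length)
-- ===== Notes on version B (the rewrite author's own statement) =====
-- stated objective: alternative
-- what changed: A computes each prime's totient-chain length by a separate truncated walk down the phi array with a memo dict; B computes all chain lengths in one increasing-order DP pass chain[n] = chain[phi[n]] + 1 and then sums the primes whose entry equals length.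
import Mathlib
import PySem

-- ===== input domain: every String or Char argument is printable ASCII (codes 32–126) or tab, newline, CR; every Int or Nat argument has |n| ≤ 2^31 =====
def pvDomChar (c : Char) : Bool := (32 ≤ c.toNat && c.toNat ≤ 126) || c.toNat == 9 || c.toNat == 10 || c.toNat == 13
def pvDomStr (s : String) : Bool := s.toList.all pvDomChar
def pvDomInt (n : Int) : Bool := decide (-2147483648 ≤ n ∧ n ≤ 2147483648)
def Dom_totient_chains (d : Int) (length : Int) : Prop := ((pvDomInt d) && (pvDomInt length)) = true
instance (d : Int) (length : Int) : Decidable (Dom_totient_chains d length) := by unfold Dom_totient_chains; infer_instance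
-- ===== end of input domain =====

-- B replaces A's per-prime truncated, memoized totient-chain walks by a single increasing-order
-- DP pass chain[n] = chain[phi[n]] + 1 over all n (objective: alternative algorithm of similar cost).

-- ===== PORT A =====

-- phi = list(range(d+1))
def phiInit (n : Nat) : Array Int := (Array.range n).map Int.ofNat

-- the index list of Python's `range(i, n, i)` (the multiples of i in [i, n), in order)
def multiples (i n : Nat) : List Nat := (List.range ((n - 1) / i)).map (fun k => (k + 1) * i)

-- phi[j] //= i ; phi[j] *= i-1
def stepA (i : Nat) (phi : Array Int) (j : Nat) : Array Int :=
  phi.setIfInBounds j (PySem.Int.floordiv (phi.getD j 0) (i : Int) * ((i : Int) - 1))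

-- one iteration of A's `for i, v in enumerate(phi)` loop (v is phi[i] at loop time)
def outerA (n : Nat) (st : Array Int × List Nat) (i : Nat) : Array Int × List Nat :=
  if i < 2 then st
  else if st.1.getD i 0 = (i : Int) then
    ((multiples i n).foldl (stepA i) st.1, st.2 ++ [i])
  else st

def sieveA (n : Nat) : Array Int × List Nat := (List.range n).foldl (outerA n) (phiInit n, [])

-- A's `while curr != 1 and chain_len <= length` loop; fuel length.toNat+1 is exact:
-- chain_len starts at 1 and grows by 1 each non-final iteration, so at fuel 0 the guard is false anyway
def walkA (phi : Array Int) (length : Int) (cache : PySem.Dict Int Int) :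
    Nat → Int → Int → Int
  | 0, _, cl => cl
  | fuel+1, curr, cl =>
    if curr ≠ 1 ∧ cl ≤ length then
      match cache.get? curr with
      | some v => cl + (v - 1)
      | none => walkA phi length cache fuel (phi.getD curr.toNat 0) (cl + 1)
    else cl

-- A's `for i in primes` loop, state (res, cache)
def mainA (phi : Array Int) (length : Int) (primes : List Nat) : Int × PySem.Dict Int Int :=
  primes.foldl (fun st (i : Nat) =>
    let cl := walkA phi length st.2 (length.toNat + 1) (i : Int) 1
    (if cl = length then st.1 + (i : Int) else st.1, st.2.insert (i : Int) cl))
    (0, PySem.Dict.empty)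

def totient_chains (d : Int) (length : Int) : Int :=
  let n := (d + 1).toNat
  let s := sieveA n
  (mainA s.1 length s.2).1

-- ===== PORT B =====

-- phi[j] -= phi[j] // i
def stepB (i : Nat) (phi : Array Int) (j : Nat) : Array Int :=
  phi.setIfInBounds j (phi.getD j 0 - PySem.Int.floordiv (phi.getD j 0) (i : Int))

-- one iteration of B's `for i in range(2, n)` sieve loop
def outerB (n : Nat) (st : Array Int × List Nat) (i : Nat) : Array Int × List Nat :=
  if st.1.getD i 0 = (i : Int) then
    ((multiples i n).foldl (stepB i) st.1, st.2 ++ [i])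
  else st

def sieveB (n : Nat) : Array Int × List Nat :=
  ((List.range n).drop 2).foldl (outerB n) (phiInit n, [])

-- chain = [0]*n ; chain[1] = 1 ; for m in range(2, n): chain[m] = chain[phi[m]] + 1
def dpB (phi : Array Int) (n : Nat) : Array Int :=
  let L0 := Array.replicate n (0 : Int)
  let L1 := if 1 < n then L0.setIfInBounds 1 1 else L0
  ((List.range n).drop 2).foldl
    (fun L m => L.setIfInBounds m (L.getD (phi.getD m 0).toNat 0 + 1)) L1

def totient_chains_alt (d : Int) (length : Int) : Int :=
  let n := (d + 1).toNat
  let s := sieveB n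
  let L := dpB s.1 n
  s.2.foldl (fun r p => if L.getD p 0 = length then r + (p : Int) else r) 0

-- ===== PRECONDITION & SPEC =====
def Spec_totient_chains (d : Int) (length : Int) (out : Int) : Prop := out = totient_chains_alt d length
instance (d : Int) (length : Int) (out : Int) : Decidable (Spec_totient_chains d length out) := by unfold Spec_totient_chains; infer_instance

-- ===== CLAIM (what is proved, stated in full; the proofs are below) =====
def Claim_equal_totient_chains : Prop := ∀ (d : Int) (length : Int), Dom_totient_chains d length → Spec_totient_chains d length (totient_chains d length)

-- ===== LEMMAS AND PROOFS =====

theorem getD_setIfInBounds (a : Array Int) (i : Nat) (v : Int) (k : Nat) :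
    (a.setIfInBounds i v).getD k 0 = if i = k ∧ k < a.size then v else a.getD k 0 := by
  simp only [Array.getD_eq_getD_getElem?, Array.getElem?_setIfInBounds]
  split_ifs with h1 h2 h3 h4 <;> simp_all

theorem getD_phiInit (n : Nat) (k : Nat) :
    (phiInit n).getD k 0 = if k < n then (k : Int) else 0 := by
  simp only [phiInit, Array.getD_eq_getD_getElem?, Array.getElem?_map]
  by_cases h : k < n
  · simp [h]
  · simp [h]

theorem size_phiInit (n : Nat) : (phiInit n).size = n := by simp [phiInit]

theorem mem_multiples {i n : Nat} (hi : 1 ≤ i) (j : Nat) :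
    j ∈ multiples i n ↔ 1 ≤ j ∧ i ∣ j ∧ j < n := by
  simp only [multiples, List.mem_map, List.mem_range]
  constructor
  · rintro ⟨k, hk, rfl⟩
    have h12 : (k + 1) * i ≤ n - 1 := (Nat.le_div_iff_mul_le hi).mp hk
    have hj1 : 1 ≤ (k + 1) * i := Nat.mul_pos (by omega) hi
    exact ⟨hj1, ⟨k + 1, Nat.mul_comm _ _⟩, by omega⟩
  · rintro ⟨h1, ⟨m, rfl⟩, hlt⟩
    have hm : 1 ≤ m := by
      rcases Nat.eq_zero_or_pos m with h | h
      · subst h; simp at h1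
      · exact h
    have hle : m * i ≤ n - 1 := by rw [Nat.mul_comm]; omega
    have hdiv : m ≤ (n - 1) / i := (Nat.le_div_iff_mul_le hi).mpr hle
    refine ⟨m - 1, by omega, ?_⟩
    have hm1 : m - 1 + 1 = m := by omega
    rw [hm1, Nat.mul_comm]

theorem nodup_multiples (i n : Nat) (hi : 1 ≤ i) : (multiples i n).Nodup := by
  refine List.Nodup.map ?_ (List.nodup_range)
  intro a b h
  have h' : (a + 1) * i = (b + 1) * i := h
  have := Nat.eq_of_mul_eq_mul_right hi h'
  omega

theorem foldl_update_size (g : Int → Int) (l : List Nat) (a : Array Int) :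
    (l.foldl (fun a j => a.setIfInBounds j (g (a.getD j 0))) a).size = a.size := by
  induction l generalizing a with
  | nil => rfl
  | cons x xs ih =>
    simp only [List.foldl_cons]
    rw [ih, Array.size_setIfInBounds]

theorem foldl_update_getD (g : Int → Int) (l : List Nat) (hl : l.Nodup) (a : Array Int) (k : Nat) :
    (l.foldl (fun a j => a.setIfInBounds j (g (a.getD j 0))) a).getD k 0
      = if k ∈ l ∧ k < a.size then g (a.getD k 0) else a.getD k 0 := by
  induction l generalizing a with
  | nil => simp
  | cons x xs ih =>
    simp only [List.foldl_cons]
    have hnd := hl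
    simp only [List.nodup_cons] at hnd
    rw [ih hnd.2]
    simp only [getD_setIfInBounds, Array.size_setIfInBounds, List.mem_cons]
    by_cases hkx : x = k
    · subst hkx
      have hnm : x ∉ xs := hnd.1
      by_cases hks : x < a.size <;> simp [hnm, hks]
    · by_cases hkm : k ∈ xs <;> by_cases hks : k < a.size <;>
        simp [hkx, hkm, hks, Ne.symm hkx]

theorem drop2_range (n : Nat) : (List.range n).drop 2 = List.range' 2 (n - 2) := by
  rcases Nat.lt_or_ge n 2 with h | h
  · interval_cases n <;> rfl
  · rw [List.range_eq_range']
    have h2 : n = 2 + (n - 2) := by omega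
    rw [h2, ← List.range'_append (s := 0) (m := 2) (n := n - 2) (step := 1)]
    rw [List.drop_append_of_le_length (by simp)]
    have e1 : List.drop 2 (List.range' 0 2) = [] := rfl
    rw [e1, List.nil_append]
    have e2 : 0 + 1 * 2 = 2 := rfl
    rw [e2]
    congr 1
    omega


def tlF (phi : Array Int) : Nat → Nat → Int
  | 0, _ => 1
  | f+1, c => if c ≤ 1 then 1 else tlF phi f (phi.getD c 0).toNat + 1

def TL (phi : Array Int) (c : Nat) : Int := tlF phi c c

def SFacts (phi : Array Int) (n : Nat) : Prop :=
  ∀ j : Nat, 2 ≤ j → j < n → 1 ≤ phi.getD j 0 ∧ phi.getD j 0 < (j : Int)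

theorem tlF_ge_one (phi : Array Int) : ∀ f c, 1 ≤ tlF phi f c := by
  intro f
  induction f with
  | zero => intro c; simp [tlF]
  | succ f ih =>
    intro c
    simp only [tlF]
    split
    · omega
    · have := ih (phi.getD c 0).toNat
      omega

theorem tlF_stable (phi : Array Int) (n : Nat) (hs : SFacts phi n) :
    ∀ c f1 f2, c ≤ f1 → c ≤ f2 → c < n → tlF phi f1 c = tlF phi f2 c := by
  intro c
  induction c using Nat.strong_induction_on with
  | _ c ih =>
    intro f1 f2 h1 h2 hn
    by_cases hc : c ≤ 1
    · cases f1 with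
      | zero => cases f2 with
        | zero => rfl
        | succ f2 => simp [tlF, hc]
      | succ f1 => cases f2 with
        | zero => simp [tlF, hc]
        | succ f2 => simp [tlF, hc]
    · have hc2 : 2 ≤ c := by omega
      obtain ⟨g1, rfl⟩ : ∃ g1, f1 = g1 + 1 := ⟨f1 - 1, by omega⟩
      obtain ⟨g2, rfl⟩ : ∃ g2, f2 = g2 + 1 := ⟨f2 - 1, by omega⟩
      simp only [tlF, if_neg hc]
      have hf := hs c hc2 hn
      set m := (phi.getD c 0).toNat with hm
      have hlt : m < c := by omega
      have key := ih m hlt g1 g2 (by omega) (by omega) (by omega)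
      rw [key]

theorem TL_ge_one (phi : Array Int) (c : Nat) : 1 ≤ TL phi c := tlF_ge_one phi c c

theorem TL_step (phi : Array Int) (n : Nat) (hs : SFacts phi n) (c : Nat)
    (h2 : 2 ≤ c) (hn : c < n) : TL phi c = TL phi (phi.getD c 0).toNat + 1 := by
  obtain ⟨g, hg⟩ : ∃ g, c = g + 1 := ⟨c - 1, by omega⟩
  have hf := hs c h2 hn
  set m := (phi.getD c 0).toNat with hm
  have hlt : m < c := by omega
  unfold TL
  conv_lhs => rw [hg]
  simp only [tlF]
  rw [if_neg (by omega : ¬ g + 1 ≤ 1), ← hg]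
  congr 1
  exact tlF_stable phi n hs m g m (by omega) (le_refl m) (by omega)

theorem dp_fold (phi : Array Int) (n : Nat) (hs : SFacts phi n)
    (L1 : Array Int) (hsz : L1.size = n) (h1 : 1 < n → L1.getD 1 0 = 1) :
    ∀ t, 2 + t ≤ n →
      (((List.range' 2 t).foldl
          (fun L m => L.setIfInBounds m (L.getD (phi.getD m 0).toNat 0 + 1)) L1).size = n ∧
       ∀ k, 1 ≤ k → k < 2 + t →
        ((List.range' 2 t).foldl
          (fun L m => L.setIfInBounds m (L.getD (phi.getD m 0).toNat 0 + 1)) L1).getD k 0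
          = TL phi k) := by
  intro t
  induction t with
  | zero =>
    intro hn
    refine ⟨hsz, ?_⟩
    intro k hk1 hk2
    have hk : k = 1 := by omega
    subst hk
    simp only [List.range', List.foldl_nil]
    rw [h1 (by omega)]
    rfl
  | succ t ih =>
    intro hn
    obtain ⟨ihs, ihv⟩ := ih (by omega)
    rw [List.range'_concat, List.foldl_append]
    set F := (List.range' 2 t).foldl
      (fun L m => L.setIfInBounds m (L.getD (phi.getD m 0).toNat 0 + 1)) L1 with hF
    simp only [List.foldl_cons, List.foldl_nil]
    have hmn : 2 + t < n := by omega
    have hm2 : 2 ≤ 2 + t := by omega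
    have hphi := hs (2 + t) hm2 hmn
    set w := (phi.getD (2 + t) 0).toNat with hw
    have hw1 : 1 ≤ w := by omega
    have hwlt : w < 2 + t := by omega
    have hval : F.getD w 0 = TL phi w := ihv w hw1 hwlt
    have hone : (2 : Nat) + 1 * t = 2 + t := by omega
    rw [hone]
    constructor
    · rw [Array.size_setIfInBounds, ihs]
    · intro k hk1 hk2
      rw [getD_setIfInBounds, ihs]
      by_cases hk : 2 + t = k
      · subst hk
        rw [if_pos ⟨rfl, hmn⟩, hval, TL_step phi n hs (2 + t) hm2 hmn, ← hw]
      · rw [if_neg (by tauto)]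
        exact ihv k hk1 (by omega)

theorem dpB_spec (phi : Array Int) (n : Nat) (hs : SFacts phi n) (k : Nat)
    (h1 : 1 ≤ k) (hk : k < n) : (dpB phi n).getD k 0 = TL phi k := by
  unfold dpB
  rw [drop2_range]
  have hn2 : 1 < n := by omega
  have hL1sz : (if 1 < n then (Array.replicate n (0:Int)).setIfInBounds 1 1 else Array.replicate n (0:Int)).size = n := by
    split <;> simp
  have hL1v : 1 < n → (if 1 < n then (Array.replicate n (0:Int)).setIfInBounds 1 1 else Array.replicate n (0:Int)).getD 1 0 = 1 := by
    intro h
    rw [if_pos h, getD_setIfInBounds]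
    simp [h]
  have := dp_fold phi n hs _ hL1sz hL1v (n - 2) (by omega)
  exact this.2 k h1 (by omega)

def SInv (n i : Nat) (st : Array Int × List Nat) : Prop :=
  st.1.size = n ∧
  (∀ j : Nat, 2 ≤ j → j < n →
    (1 ≤ st.1.getD j 0 ∧ st.1.getD j 0 ≤ (j : Int)) ∧
    ((∃ p : Nat, Nat.Prime p ∧ p < i ∧ p ∣ j) → st.1.getD j 0 < (j : Int)) ∧
    ((∀ p : Nat, Nat.Prime p → p < i → ¬ p ∣ j) → st.1.getD j 0 = (j : Int)) ∧
    (∀ q : Nat, Nat.Prime q → i ≤ q → q ∣ j → ((q : Int)) ∣ st.1.getD j 0)) ∧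
  (∀ p ∈ st.2, 2 ≤ p ∧ p < n)
def partialA (n i : Nat) : Array Int × List Nat :=
  (List.range i).foldl (outerA n) (phiInit n, [])
def partialB (n i : Nat) : Array Int × List Nat :=
  ((List.range i).drop 2).foldl (outerB n) (phiInit n, [])


-- exact floor division
theorem floordiv_exact (i m : Int) (hi : 0 < i) : PySem.Int.floordiv (i * m) i = m := by
  rw [PySem.Int.floordiv_eq_ediv_of_pos hi, Int.mul_ediv_cancel_left m (by omega)]

theorem SInv_succ_of_not_prime {n i : Nat} {st : Array Int × List Nat}
    (h : SInv n i st) (hnp : ¬ Nat.Prime i) : SInv n (i + 1) st := by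
  obtain ⟨hsz, hmain, hpr⟩ := h
  refine ⟨hsz, ?_, hpr⟩
  intro j h2 hn
  obtain ⟨ha, hb, hc, hd⟩ := hmain j h2 hn
  refine ⟨ha, ?_, ?_, ?_⟩
  · rintro ⟨p, hp, hpi, hpd⟩
    rcases Nat.lt_or_ge p i with h' | h'
    · exact hb ⟨p, hp, h', hpd⟩
    · have : p = i := by omega
      subst this
      exact absurd hp hnp
  · intro h'
    exact hc (fun p hp hpi => h' p hp (by omega))
  · intro q hq hiq hqd
    exact hd q hq (by omega) hqd

-- the invariant is preserved by a prime step, and the A- and B-updates coincide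
theorem sieve_step {n i : Nat} {st : Array Int × List Nat}
    (hinv : SInv n i st) (hi2 : 2 ≤ i) (hin : i < n)
    (hv : st.1.getD i 0 = (i : Int)) :
    Nat.Prime i ∧
    (multiples i n).foldl (stepA i) st.1 = (multiples i n).foldl (stepB i) st.1 ∧
    SInv n (i + 1) ((multiples i n).foldl (stepA i) st.1, st.2 ++ [i]) := by
  obtain ⟨phi, primes⟩ := st
  have hsz : phi.size = n := hinv.1
  have hmain : ∀ j : Nat, 2 ≤ j → j < n →
      (1 ≤ phi.getD j 0 ∧ phi.getD j 0 ≤ (j : Int)) ∧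
      ((∃ p : Nat, Nat.Prime p ∧ p < i ∧ p ∣ j) → phi.getD j 0 < (j : Int)) ∧
      ((∀ p : Nat, Nat.Prime p → p < i → ¬ p ∣ j) → phi.getD j 0 = (j : Int)) ∧
      (∀ q : Nat, Nat.Prime q → i ≤ q → q ∣ j → ((q : Int)) ∣ phi.getD j 0) := hinv.2.1
  have hpr : ∀ p ∈ primes, 2 ≤ p ∧ p < n := hinv.2.2
  have hv' : phi.getD i 0 = (i : Int) := hv
  have hi1 : 1 ≤ i := by omega
  have gA : Int → Int := fun x => PySem.Int.floordiv x (i : Int) * ((i : Int) - 1)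
  -- primality of i
  have hprime : Nat.Prime i := by
    by_contra hnp
    have hne1 : i ≠ 1 := by omega
    have hmf : Nat.Prime i.minFac := Nat.minFac_prime hne1
    have hmfd : i.minFac ∣ i := Nat.minFac_dvd i
    have hmflt : i.minFac < i := by
      rcases Nat.lt_or_ge i.minFac i with h | h
      · exact h
      · have := Nat.le_of_dvd (by omega) hmfd
        have : i.minFac = i := by omega
        rw [Nat.prime_def_minFac] at hnp
        exact absurd ⟨hi2, this⟩ hnp
    have := (hmain i hi2 hin).2.1 ⟨i.minFac, hmf, hmflt, hmfd⟩
    omega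
  have hstepA : stepA i = fun (a : Array Int) (j : Nat) =>
      a.setIfInBounds j ((fun x => PySem.Int.floordiv x (i : Int) * ((i : Int) - 1)) (a.getD j 0)) := rfl
  have hstepB : stepB i = fun (a : Array Int) (j : Nat) =>
      a.setIfInBounds j ((fun x => x - PySem.Int.floordiv x (i : Int)) (a.getD j 0)) := rfl
  have hnd := nodup_multiples i n hi1
  -- pointwise values of both folds
  have hAval : ∀ k : Nat, ((multiples i n).foldl (stepA i) phi).getD k 0
      = if k ∈ multiples i n ∧ k < phi.size
        then PySem.Int.floordiv (phi.getD k 0) (i : Int) * ((i : Int) - 1) else phi.getD k 0 := by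
    intro k
    rw [hstepA, foldl_update_getD (fun x => PySem.Int.floordiv x (i : Int) * ((i : Int) - 1))
      (multiples i n) hnd phi k]
  have hBval : ∀ k : Nat, ((multiples i n).foldl (stepB i) phi).getD k 0
      = if k ∈ multiples i n ∧ k < phi.size
        then phi.getD k 0 - PySem.Int.floordiv (phi.getD k 0) (i : Int) else phi.getD k 0 := by
    intro k
    rw [hstepB, foldl_update_getD (fun x => x - PySem.Int.floordiv x (i : Int))
      (multiples i n) hnd phi k]
  have hAsz : ((multiples i n).foldl (stepA i) phi).size = phi.size := by
    rw [hstepA, foldl_update_size (fun x => PySem.Int.floordiv x (i : Int) * ((i : Int) - 1))]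
  have hBsz : ((multiples i n).foldl (stepB i) phi).size = phi.size := by
    rw [hstepB, foldl_update_size (fun x => x - PySem.Int.floordiv x (i : Int))]
  have hiI : (0 : Int) < (i : Int) := by exact_mod_cast Nat.lt_of_lt_of_le Nat.zero_lt_two hi2
  have hii2 : (2 : Int) ≤ (i : Int) := by exact_mod_cast hi2
  -- facts about an updated index
  have hupd : ∀ k : Nat, k ∈ multiples i n →
      ∃ m : Int, 1 ≤ m ∧ phi.getD k 0 = (i : Int) * m ∧
        PySem.Int.floordiv (phi.getD k 0) (i : Int) * ((i : Int) - 1) = (i : Int) * m - m ∧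
        phi.getD k 0 - PySem.Int.floordiv (phi.getD k 0) (i : Int) = (i : Int) * m - m := by
    intro k hk
    obtain ⟨hk1, hkd, hkn⟩ := (mem_multiples hi1 k).mp hk
    have hk2 : 2 ≤ k := by
      have := Nat.le_of_dvd (by omega) hkd
      omega
    obtain ⟨hka, _, _, hkdvd⟩ := hmain k hk2 hkn
    obtain ⟨m, hm⟩ := hkdvd i hprime (le_refl i) hkd
    have hm1 : 1 ≤ m := by nlinarith [hka.1]
    refine ⟨m, hm1, hm, ?_, ?_⟩
    · rw [hm, floordiv_exact _ _ hiI]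
      ring
    · rw [hm, floordiv_exact _ _ hiI]
  -- the two folds agree
  have heq : (multiples i n).foldl (stepA i) phi = (multiples i n).foldl (stepB i) phi := by
    apply Array.ext
    · rw [hAsz, hBsz]
    · intro k hk1 hk2
      have h1 : ∀ (a : Array Int) (h : k < a.size), a[k] = a.getD k 0 := by
        intro a h
        simp [Array.getD, h]
      rw [h1 _ hk1, h1 _ hk2, hAval, hBval]
      by_cases hmem : k ∈ multiples i n ∧ k < phi.size
      · obtain ⟨m, _, _, he1, he2⟩ := hupd k hmem.1
        rw [if_pos hmem, if_pos hmem, he1, he2]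
      · rw [if_neg hmem, if_neg hmem]
  refine ⟨hprime, heq, ?_, ?_, ?_⟩
  · show ((multiples i n).foldl (stepA i) phi).size = n
    rw [hAsz, hsz]
  · intro j h2 hn
    obtain ⟨ha, hb, hc, hd⟩ := hmain j h2 hn
    show (1 ≤ ((multiples i n).foldl (stepA i) phi).getD j 0 ∧ _) ∧ _
    rw [hAval j]
    by_cases hmem : j ∈ multiples i n ∧ j < phi.size
    · obtain ⟨m, hm1, hmold, he1, _⟩ := hupd j hmem.1
      rw [if_pos hmem, he1]
      have hidvd : i ∣ j := ((mem_multiples hi1 j).mp hmem.1).2.1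
      have hold1 : 1 ≤ (i:Int) * m := by rw [← hmold]; exact ha.1
      have holdj : (i:Int) * m ≤ (j : Int) := by rw [← hmold]; exact ha.2
      have hnew1 : (1:Int) ≤ (i:Int) * m - m := by
        have h9 : (1:Int) * 1 ≤ m * ((i:Int) - 1) :=
          mul_le_mul hm1 (by omega) (by omega) (by omega)
        have h10 : (i:Int) * m - m = m * ((i:Int) - 1) := by ring
        linarith
      have hnewlt : (i:Int) * m - m < (j:Int) := by linarith
      refine ⟨⟨hnew1, by linarith⟩, ?_, ?_, ?_⟩
      · intro _
        exact hnewlt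
      · intro hcon
        exact absurd hidvd (hcon i hprime (by omega))
      · intro q hq hiq hqd
        have hqold := hd q hq (by omega) hqd
        rw [hmold] at hqold
        have hqI : Prime ((q : Int)) := Nat.prime_iff_prime_int.mp hq
        rcases hqI.2.2 _ _ hqold with hqi | hqm
        · exfalso
          have h11 : q ∣ i := Int.natCast_dvd_natCast.mp hqi
          have := Nat.le_of_dvd (by omega) h11
          omega
        · have h12 : (i:Int) * m - m = m * ((i:Int) - 1) := by ring
          rw [h12]
          exact Dvd.dvd.mul_right hqm _
    · rw [if_neg hmem]
      have hnm : ¬ i ∣ j := by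
        intro hdvd
        exact hmem ⟨(mem_multiples hi1 j).mpr ⟨by omega, hdvd, hn⟩, by omega⟩
      refine ⟨ha, ?_, ?_, ?_⟩
      · rintro ⟨p, hp, hpi, hpd⟩
        rcases Nat.lt_or_ge p i with h' | h'
        · exact hb ⟨p, hp, h', hpd⟩
        · have : p = i := by omega
          subst this
          exact absurd hpd hnm
      · intro h'
        exact hc (fun p hp hpi => h' p hp (by omega))
      · intro q hq hiq hqd
        exact hd q hq (by omega) hqd
  · intro p hp
    rcases List.mem_append.mp hp with h | h
    · exact hpr p h
    · simp at h
      omega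

theorem sieve_invariant (n : Nat) :
    ∀ i, i ≤ n → partialA n i = partialB n i ∧ SInv n i (partialA n i) := by
  intro i
  induction i with
  | zero =>
    intro _
    constructor
    · rfl
    · refine ⟨size_phiInit n, ?_, by simp [partialA]⟩
      intro j h2 hn
      simp only [partialA, List.range_zero, List.foldl_nil]
      rw [getD_phiInit, if_pos hn]
      refine ⟨⟨by omega, le_refl _⟩, ?_, fun _ => rfl, ?_⟩
      · rintro ⟨p, _, hp0, _⟩
        exact absurd hp0 (Nat.not_lt_zero p)
      · intro q _ _ hqd
        exact Int.natCast_dvd_natCast.mpr hqd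
  | succ i ih =>
    intro hin
    obtain ⟨heq, hinv⟩ := ih (by omega)
    have hA : partialA n (i + 1) = outerA n (partialA n i) i := by
      unfold partialA
      rw [List.range_succ, List.foldl_append, List.foldl_cons, List.foldl_nil]
    by_cases hi2 : i < 2
    · have hB : partialB n (i + 1) = partialB n i := by
        unfold partialB
        rw [drop2_range, drop2_range]
        have e1 : i + 1 - 2 = 0 := by omega
        have e2 : i - 2 = 0 := by omega
        rw [e1, e2]
      have hA' : partialA n (i + 1) = partialA n i := by
        rw [hA]
        unfold outerA
        rw [if_pos hi2]
      have hnp : ¬ Nat.Prime i := by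
        intro hp
        have := hp.two_le
        omega
      rw [hA', hB]
      exact ⟨heq, SInv_succ_of_not_prime hinv hnp⟩
    · rw [Nat.not_lt] at hi2
      have hilt : i < n := by omega
      have hB : partialB n (i + 1) = outerB n (partialB n i) i := by
        unfold partialB
        rw [drop2_range, drop2_range]
        have e1 : i + 1 - 2 = (i - 2) + 1 := by omega
        rw [e1, List.range'_concat, List.foldl_append, List.foldl_cons, List.foldl_nil]
        have e2 : 2 + 1 * (i - 2) = i := by omega
        rw [e2]
      rw [hA, hB, ← heq]
      by_cases hv : (partialA n i).1.getD i 0 = (i : Int)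
      · obtain ⟨hprime, hfeq, hinv'⟩ := sieve_step hinv hi2 hilt hv
        unfold outerA outerB
        rw [if_neg (by omega), if_pos hv, if_pos hv]
        exact ⟨by rw [hfeq], hinv'⟩
      · unfold outerA outerB
        rw [if_neg (by omega), if_neg hv, if_neg hv]
        have hnp : ¬ Nat.Prime i := by
          intro hp
          apply hv
          apply (hinv.2.1 i hi2 hilt).2.2.1
          intro p hpp hpi hpd
          rcases (Nat.Prime.eq_one_or_self_of_dvd hp p hpd) with h | h
          · exact absurd h (Nat.Prime.ne_one hpp)
          · omega
        exact ⟨rfl, SInv_succ_of_not_prime hinv hnp⟩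

def CI (phi : Array Int) (n : Nat) (length : Int) (cache : PySem.Dict Int Int) : Prop :=
  ∀ k v, cache.get? k = some v → ∃ kn : Nat, k = (kn : Int) ∧ 2 ≤ kn ∧ kn < n ∧
    (TL phi kn ≤ length → v = TL phi kn) ∧ (length < TL phi kn → length < v)


theorem walk_spec (phi : Array Int) (n : Nat) (length : Int) (hs : SFacts phi n)
    (cache : PySem.Dict Int Int) (hci : CI phi n length cache) :
    ∀ (fuel : Nat) (cn : Nat) (cl : Int), 1 ≤ cn → cn < n → 1 ≤ cl →
      length + 2 ≤ cl + fuel →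
      ((cl - 1 + TL phi cn ≤ length →
          walkA phi length cache fuel (cn : Int) cl = cl - 1 + TL phi cn) ∧
       (length < cl - 1 + TL phi cn →
          length < walkA phi length cache fuel (cn : Int) cl)) := by
  intro fuel
  induction fuel with
  | zero =>
    intro cn cl h1 hn hcl hfl
    have ht := TL_ge_one phi cn
    constructor
    · intro h; simp only [walkA]; push_cast at hfl; omega
    · intro h; simp only [walkA]; push_cast at hfl; omega
  | succ fuel ih =>
    intro cn cl h1 hn hcl hfl
    have ht := TL_ge_one phi cn
    by_cases hcn1 : cn = 1
    · subst hcn1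
      have : ¬ (((1:Nat) : Int) ≠ 1 ∧ cl ≤ length) := by simp
      simp only [walkA, if_neg this]
      have htl : TL phi 1 = 1 := rfl
      constructor <;> (intro h; omega)
    · have hcn2 : 2 ≤ cn := by omega
      by_cases hcle : cl ≤ length
      · have hcond : ((cn : Int) ≠ 1 ∧ cl ≤ length) := by
          constructor
          · intro h; apply hcn1; exact_mod_cast h
          · exact hcle
        rcases hget : cache.get? (cn : Int) with _ | v
        · have hf := hs cn hcn2 hn
          set m := (phi.getD cn 0).toNat with hm
          have hmc : (m : Int) = phi.getD cn 0 := by omega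
          have hm1 : 1 ≤ m := by omega
          have hmlt : m < cn := by omega
          have hstep := TL_step phi n hs cn hcn2 hn
          rw [← hm] at hstep
          have hih := ih m (cl + 1) hm1 (by omega) (by omega) (by omega)
          simp only [walkA, if_pos hcond, hget, Int.toNat_natCast, ← hmc]
          constructor
          · intro h
            rw [(hih.1 (by omega))]
            omega
          · intro h
            exact hih.2 (by omega)
        · obtain ⟨kn, hkeq, hk2, hkn, hv1, hv2⟩ := hci _ _ hget
          simp only [walkA, if_pos hcond, hget]
          have hknc : kn = cn := by exact_mod_cast hkeq.symm
          subst hknc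
          by_cases htl : TL phi kn ≤ length
          · rw [hv1 htl]; constructor <;> (intro h; omega)
          · have := hv2 (by omega)
            constructor <;> (intro h; omega)
      · have hcond : ¬ ((cn : Int) ≠ 1 ∧ cl ≤ length) := by
          intro h; exact hcle h.2
        simp only [walkA, if_neg hcond]
        constructor <;> (intro h; omega)

theorem mainA_spec (phi : Array Int) (n : Nat) (length : Int) (hs : SFacts phi n) :
    ∀ (primes : List Nat), (∀ p ∈ primes, 2 ≤ p ∧ p < n) →
    ∀ (res : Int) (cache : PySem.Dict Int Int), CI phi n length cache →
      (primes.foldl (fun (st : Int × PySem.Dict Int Int) (i : Nat) =>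
        let cl := walkA phi length st.2 (length.toNat + 1) (i : Int) 1
        (if cl = length then st.1 + (i : Int) else st.1, st.2.insert (i : Int) cl))
        (res, cache)).1
      = primes.foldl (fun r p => if TL phi p = length then r + (p : Int) else r) res := by
  intro primes
  induction primes with
  | nil => intro _ res cache _; rfl
  | cons p ps ih =>
    intro hp res cache hci
    have hpb := hp p (List.mem_cons_self)
    have hw := walk_spec phi n length hs cache hci (length.toNat + 1) p 1
      (by omega) hpb.2 (by omega)
      (by have := Int.self_le_toNat length; push_cast; omega)
    have hT : (1 : Int) - 1 + TL phi p = TL phi p := by ring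
    rw [hT] at hw
    set cl := walkA phi length cache (length.toNat + 1) (p : Int) 1 with hcl
    have hiff : (cl = length) ↔ (TL phi p = length) := by
      constructor
      · intro h
        by_cases htl : TL phi p ≤ length
        · rw [← hw.1 htl]; exact h
        · have := hw.2 (by omega); omega
      · intro h
        rw [hw.1 (by omega), h]
    have hci' : CI phi n length (cache.insert (p : Int) cl) := by
      intro k v hget
      rw [PySem.Dict.get?_insert] at hget
      by_cases hk : k = (p : Int)
      · rw [if_pos hk] at hget
        obtain rfl : cl = v := by injection hget
        refine ⟨p, hk, hpb.1, hpb.2, ?_, ?_⟩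
        · intro htl; exact hw.1 htl
        · intro htl; exact hw.2 (by omega)
      · rw [if_neg hk] at hget
        exact hci k v hget
    simp only [List.foldl_cons]
    rw [ih (fun q hq => hp q (List.mem_cons_of_mem _ hq)) _ _ hci']
    congr 1
    by_cases h : TL phi p = length
    · rw [if_pos (hiff.mpr h), if_pos h]
    · rw [if_neg (fun hc => h (hiff.mp hc)), if_neg h]


-- ===== VERDICT (by name: the statement is the Claim_ definition above) =====
theorem totient_chains_spec : Claim_equal_totient_chains := by
  intro d length _
  unfold Spec_totient_chains
  set n := (d + 1).toNat with hn
  obtain ⟨heq, hinv⟩ := sieve_invariant n n (le_refl n)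
  have hAeq : sieveA n = partialA n n := rfl
  have hBeq : sieveB n = partialB n n := rfl
  have goalA : totient_chains d length = (mainA (sieveA n).1 length (sieveA n).2).1 := rfl
  have goalB : totient_chains_alt d length
      = (sieveB n).2.foldl
          (fun r p => if (dpB (sieveB n).1 n).getD p 0 = length then r + (p : Int) else r) 0 := rfl
  rw [goalA, goalB, hAeq, hBeq, ← heq]
  set phi := (partialA n n).1 with hphi
  set primes := (partialA n n).2 with hprimes
  have hs : SFacts phi n := by
    intro j h2 hjn
    obtain ⟨ha, hb, _, _⟩ := hinv.2.1 j h2 hjn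
    have hmf : Nat.Prime j.minFac := Nat.minFac_prime (by omega)
    have hlt : j.minFac < n := Nat.lt_of_le_of_lt (Nat.minFac_le (by omega)) hjn
    exact ⟨ha.1, hb ⟨j.minFac, hmf, hlt, Nat.minFac_dvd j⟩⟩
  have hp : ∀ p ∈ primes, 2 ≤ p ∧ p < n := hinv.2.2
  have hciE : CI phi n length PySem.Dict.empty := by
    intro k v h
    rw [PySem.Dict.get?_empty] at h
    exact absurd h (by simp)
  have hA : (mainA phi length primes).1
      = primes.foldl (fun r p => if TL phi p = length then r + (p : Int) else r) 0 := by
    unfold mainA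
    exact mainA_spec phi n length hs primes hp 0 PySem.Dict.empty hciE
  rw [hA]
  apply Eq.symm
  apply PySem.List.foldl_congr_mem
  intro acc x hx
  have hx' := hp x hx
  rw [dpB_spec phi n hs x (by omega) hx'.2]
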